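-- pv_equiv track=rewrite | github.com/reisenx/2110101-COM-PROG | 09-Nested-Structure/09_MoreDC_34/09_MoreDC_34.py | pattern4
-- ===== SOURCE A (Python) =====
-- def pattern4(N):
--     # Set initial start number at row 1
--     start = 1
--     # Create N x N matrix
--     matrix = []
--     for i in range(N):
--         # Add 0 before adding a number
--         row = [0]*i
--         # Setup a start number of each row
--         start += i
--         # Calculate numbers after 0
--         num = start
--         for j in range(i,N):
--             row.append(num)
--             num += j+2
--         # Add each row to a matrix
--         matrix.append(row)
--     return matrix
-- ===== SOURCE B (Python) =====
-- def pattern4(N):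
--     # Closed form: value at (i, j) for j >= i is base[j] - i, where base is the first row.
--     base = [1 + 2*j + j*(j-1)//2 for j in range(N)]
--     return [[0]*i + [b - i for b in base[i:]] for i in range(N)]
-- ===== Notes on version B (the rewrite author's own statement) =====
-- stated objective: alternative
-- what changed: Replaced A's two nested loops with running accumulators (start += i, num += j+2) by a closed-form base vector base[j] = 1 + 2*j + j*(j-1)//2 (the first row) built once, each row i being [0]*i plus base[i:] shifted down by i.
import Mathlib
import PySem

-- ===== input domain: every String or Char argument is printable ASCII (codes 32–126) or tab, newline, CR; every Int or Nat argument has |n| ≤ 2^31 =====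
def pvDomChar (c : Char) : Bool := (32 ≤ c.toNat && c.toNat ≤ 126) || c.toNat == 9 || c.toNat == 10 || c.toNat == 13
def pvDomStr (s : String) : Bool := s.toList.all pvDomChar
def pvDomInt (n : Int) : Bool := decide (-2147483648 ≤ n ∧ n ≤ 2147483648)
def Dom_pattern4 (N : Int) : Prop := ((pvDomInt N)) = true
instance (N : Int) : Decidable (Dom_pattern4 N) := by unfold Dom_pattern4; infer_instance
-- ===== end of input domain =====

-- B builds the first row once as a closed-form base vector and forms row i as [0]*i ++ (base[i:] shifted by -i),
-- replacing A's nested running accumulators; alternative decomposition, same asymptotic cost.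

-- ===== PORT A =====
def pattern4 (N : Int) : List (List Int) :=
  let start : Int := 1
  let matrix : List (List Int) := []
  let res := (PySem.List.pyRange 0 N 1).foldl (fun (st : List (List Int) × Int) i =>
      let row := PySem.List.pyRepeat [(0:Int)] i
      let start := st.2 + i
      let num := start
      let inner := (PySem.List.pyRange i N 1).foldl
        (fun (rs : List Int × Int) j => (rs.1 ++ [rs.2], rs.2 + (j + 2))) (row, num)
      (st.1 ++ [inner.1], start))
    (matrix, start)
  res.1

-- ===== PORT B =====
def pattern4_alt (N : Int) : List (List Int) :=
  let base := (PySem.List.pyRange 0 N 1).map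
    (fun j => 1 + 2*j + PySem.Int.floordiv (j*(j-1)) 2)
  (PySem.List.pyRange 0 N 1).map (fun i =>
    PySem.List.pyRepeat [(0:Int)] i ++
      (PySem.List.slice base (some i) none).map (fun b => b - i))

-- ===== PRECONDITION & SPEC =====
def Spec_pattern4 (N : Int) (out : List (List Int)) : Prop := out = pattern4_alt N
instance (N : Int) (out : List (List Int)) : Decidable (Spec_pattern4 N out) := by unfold Spec_pattern4; infer_instance

-- ===== CLAIM (what is proved, stated in full; the proofs are below) =====
def Claim_equal_pattern4 : Prop := ∀ (N : Int), Dom_pattern4 N → Spec_pattern4 N (pattern4 N)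

-- ===== LEMMAS AND PROOFS =====

/-- The closed-form entry generator: `pvF j` is base[j], the first-row value in column j. -/
def pvF (j : Int) : Int := 1 + 2*j + PySem.Int.floordiv (j*(j-1)) 2

lemma pvF_succ (j : Int) : pvF (j+1) = pvF j + j + 2 := by
  have h1 : 2 ∣ j*(j-1) := (Int.even_mul_pred_self j).two_dvd
  have h2 : 2 ∣ (j+1)*j := by
    have := (Int.even_mul_succ_self j).two_dvd; rwa [mul_comm]
  unfold pvF
  rw [PySem.Int.floordiv_eq_ediv_of_pos (by norm_num),
      PySem.Int.floordiv_eq_ediv_of_pos (by norm_num)]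
  have e : (j+1)*((j+1)-1) = (j+1)*j := by ring
  rw [e]
  have hj : (j+1)*j = j*(j-1) + 2*j := by ring
  omega

lemma inner_loop (N i : Int) : ∀ (n : Nat) (j0 : Int), (N - j0).toNat = n →
    ∀ (r : List Int) (s : Int), s = pvF j0 - i →
    ((PySem.List.pyRange j0 N 1).foldl
      (fun (rs : List Int × Int) j => (rs.1 ++ [rs.2], rs.2 + (j + 2))) (r, s)).1
      = r ++ (PySem.List.pyRange j0 N 1).map (fun j => pvF j - i) := by
  intro n
  induction n with
  | zero =>
    intro j0 hn r s hs
    rw [PySem.List.pyRange_one_eq_nil (by omega)]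
    simp
  | succ n ih =>
    intro j0 hn r s hs
    by_cases h : j0 < N
    · rw [PySem.List.pyRange_one_cons h]
      simp only [List.foldl_cons, List.map_cons]
      rw [ih (j0+1) (by omega) (r ++ [s]) (s + (j0 + 2))
        (by rw [hs, pvF_succ]; ring)]
      simp [hs]
    · rw [PySem.List.pyRange_one_eq_nil (by omega)]
      simp

lemma outer_loop (N : Int) : ∀ (n : Nat) (i0 : Int), (N - i0).toNat = n →
    ∀ (acc : List (List Int)) (s : Int), s = pvF i0 - 2*i0 →
    ((PySem.List.pyRange i0 N 1).foldl (fun (st : List (List Int) × Int) i =>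
        let row := PySem.List.pyRepeat [(0:Int)] i
        let start := st.2 + i
        let num := start
        let inner := (PySem.List.pyRange i N 1).foldl
          (fun (rs : List Int × Int) j => (rs.1 ++ [rs.2], rs.2 + (j + 2))) (row, num)
        (st.1 ++ [inner.1], start)) (acc, s)).1
      = acc ++ (PySem.List.pyRange i0 N 1).map (fun i =>
          PySem.List.pyRepeat [(0:Int)] i ++
            (PySem.List.pyRange i N 1).map (fun j => pvF j - i)) := by
  intro n
  induction n with
  | zero =>
    intro i0 hn acc s hs
    rw [PySem.List.pyRange_one_eq_nil (by omega)]
    simp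
  | succ n ih =>
    intro i0 hn acc s hs
    by_cases h : i0 < N
    · rw [PySem.List.pyRange_one_cons h]
      simp only [List.foldl_cons, List.map_cons]
      rw [inner_loop N i0 (N - i0).toNat i0 rfl _ (s + i0) (by rw [hs]; ring)]
      rw [ih (i0+1) (by omega) _ (s + i0)
        (by rw [hs, pvF_succ]; ring)]
      simp
    · rw [PySem.List.pyRange_one_eq_nil (by omega)]
      simp

lemma pyRange_drop (a b : Int) : ∀ (k : Nat),
    (PySem.List.pyRange a b 1).drop k = PySem.List.pyRange (a + k) b 1 := by
  intro k
  induction k generalizing a with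
  | zero => simp
  | succ k ih =>
    by_cases h : a < b
    · rw [PySem.List.pyRange_one_cons h]
      rw [List.drop_succ_cons, ih (a+1)]
      congr 1; push_cast; ring
    · rw [PySem.List.pyRange_one_eq_nil (by omega),
          PySem.List.pyRange_one_eq_nil (by omega)]
      simp

lemma alt_eq (N : Int) : pattern4_alt N
    = (PySem.List.pyRange 0 N 1).map (fun i =>
        PySem.List.pyRepeat [(0:Int)] i ++
          (PySem.List.pyRange i N 1).map (fun j => pvF j - i)) := by
  unfold pattern4_alt
  simp only []
  refine List.map_congr_left (fun i hi => ?_)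
  have h0i : 0 ≤ i := ((PySem.List.mem_pyRange_one).1 hi).1
  rw [PySem.List.slice_from _ h0i, ← List.map_drop, pyRange_drop 0 N i.toNat]
  have : ((i.toNat : Int)) = i := Int.toNat_of_nonneg h0i
  rw [List.map_map]
  simp [this, pvF, Function.comp]

-- ===== VERDICT (by name: the statement is the Claim_ definition above) =====
theorem pattern4_spec : Claim_equal_pattern4 := by
  intro N _
  unfold Spec_pattern4
  show pattern4 N = pattern4_alt N
  unfold pattern4
  simp only []
  rw [outer_loop N (N - 0).toNat 0 rfl [] 1 (by decide), alt_eq]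
  simp
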